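-- pv_equiv track=rewrite | github.com/e6000000/OnePriscilla | EDsrc/main/p5.py | get_by_key
-- ===== SOURCE A (Python) =====
-- def get_by_key(result_array, key_name, step=5):
--     """
--     Retrieves the value associated with a key name from the 1D array.
--
--     Schema: ID | KEY | val1 | val2 | val3 | val4
--
--     Args:
--         result_array: The 1D array from parse_config_file()
--         key_name: The key to search for (e.g., "c_btn20", "key_10__50__")
--         step: Step size (default 5)
--
--     Returns:
--         The value at position [key_position + 1], or None if not found
--
--     Example:
--         If array[20] = "c_btn20", then returns array[21] = "#3e3e42"
--     """
--     # Loop through array in steps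
--     for i in range(0, len(result_array), step):
--         # Check if this position contains the key
--         if result_array[i] == key_name:
--             # Return the next position (val1)
--             next_pos = i + 1
--             if next_pos < len(result_array):
--                 return result_array[next_pos]
--             else:
--                 return None
--
--     return None  # Key not found
-- ===== SOURCE B (Python) =====
-- def get_by_key(result_array, key_name, step=5):
--     # Build a first-match index in one pass, then do a single dict lookup.
--     d = {}
--     n = len(result_array)
--     for i in range(0, n, step):
--         k = result_array[i]
--         if k not in d:
--             d[k] = result_array[i + 1] if i + 1 < n else None
--     return d.get(key_name)
-- ===== Notes on version B (the rewrite author's own statement) =====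
-- stated objective: alternative
-- what changed: Replaces A's early-exit linear search over the stepped positions by building a first-match dict index over all stepped positions in one pass and finishing with a single dict lookup.
import Mathlib
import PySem

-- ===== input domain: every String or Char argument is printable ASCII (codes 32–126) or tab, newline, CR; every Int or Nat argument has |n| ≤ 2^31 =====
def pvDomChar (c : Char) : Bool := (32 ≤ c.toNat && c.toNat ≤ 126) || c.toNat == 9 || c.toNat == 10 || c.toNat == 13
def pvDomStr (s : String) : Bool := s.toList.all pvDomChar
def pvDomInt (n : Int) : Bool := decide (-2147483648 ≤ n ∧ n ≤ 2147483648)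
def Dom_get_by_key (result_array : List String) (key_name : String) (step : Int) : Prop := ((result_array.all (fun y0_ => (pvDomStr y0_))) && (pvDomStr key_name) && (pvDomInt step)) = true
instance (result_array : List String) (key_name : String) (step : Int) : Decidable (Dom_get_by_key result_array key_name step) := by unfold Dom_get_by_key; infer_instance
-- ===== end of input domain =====

-- B builds a first-match dict index over all stepped positions and finishes with one lookup,
-- instead of A's early-exit linear search; return value only, no argument is mutated.

-- ===== PORT A =====
-- the 'for i in range(0, len(result_array), step)' loop with its early returns
def get_by_key_go (result_array : List String) (key_name : String) : List Int → Option String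
  | [] => none                        -- loop finished: key not found
  | i :: rest =>
    match PySem.List.pyGet? result_array i with
    | none => none                    -- IndexError (unreachable: range indices are in bounds)
    | some v =>
      if v = key_name then
        if i + 1 < (result_array.length : Int) then
          PySem.List.pyGet? result_array (i + 1)
        else none
      else get_by_key_go result_array key_name rest

def get_by_key (result_array : List String) (key_name : String) (step : Int) : Option String :=
  get_by_key_go result_array key_name (PySem.List.pyRange 0 result_array.length step)

-- ===== PORT B =====
-- the index-building loop body: keep the FIRST occurrence of each key
def get_by_key_alt_ins (result_array : List String) (n : Int)
    (d : PySem.Dict String (Option String)) (i : Int) : PySem.Dict String (Option String) :=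
  match PySem.List.pyGet? result_array i with
  | none => d                         -- IndexError (unreachable: range indices are in bounds)
  | some k =>
    if d.contains k then d
    else d.insert k (if i + 1 < n then PySem.List.pyGet? result_array (i + 1) else none)

def get_by_key_alt (result_array : List String) (key_name : String) (step : Int) : Option String :=
  let n : Int := result_array.length
  let d := (PySem.List.pyRange 0 n step).foldl (get_by_key_alt_ins result_array n) PySem.Dict.empty
  (d.get? key_name).getD none

-- ===== PRECONDITION & SPEC =====
-- Pre_ excludes only step = 0, where Python's range(0, n, 0) raises ValueError in both A and B.
def Pre_get_by_key (result_array : List String) (key_name : String) (step : Int) : Prop := step ≠ 0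
instance (result_array : List String) (key_name : String) (step : Int) : Decidable (Pre_get_by_key result_array key_name step) := by unfold Pre_get_by_key; infer_instance
def pvWitness_get_by_key : List String × String × Int := (["id", "k", "v1", "v2", "v3"], "id", 5)

def Spec_get_by_key (result_array : List String) (key_name : String) (step : Int) (out : Option String) : Prop := out = get_by_key_alt result_array key_name step
instance (result_array : List String) (key_name : String) (step : Int) (out : Option String) : Decidable (Spec_get_by_key result_array key_name step out) := by unfold Spec_get_by_key; infer_instance

-- ===== CLAIM (what is proved, stated in full; the proofs are below) =====
def Claim_equal_get_by_key : Prop := ∀ (result_array : List String) (key_name : String) (step : Int), Dom_get_by_key result_array key_name step → Pre_get_by_key result_array key_name step → Spec_get_by_key result_array key_name step (get_by_key result_array key_name step)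

-- ===== LEMMAS AND PROOFS =====

-- Every index of range(0, n, step) is in [0, n)  (for step < 0 the range is empty since n ≥ 0).
theorem pv_mem_range_bounds (n step i : Int) (hn : 0 ≤ n) (_hs : step ≠ 0)
    (h : i ∈ PySem.List.pyRange 0 n step) : 0 ≤ i ∧ i < n := by
  rcases lt_trichotomy step 0 with hneg | hz | hpos
  · exfalso
    simp only [PySem.List.pyRange] at h
    rw [if_neg (by omega), if_neg (by omega), if_neg (by omega)] at h
    simp at h
  · omega
  · rw [PySem.List.mem_pyRange_iff_of_pos hpos] at h
    omega

-- Loop invariant: after folding B's insert over the remaining indices L starting from dict d,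
-- looking up key_name gives d's value if the key is already present, and otherwise A's
-- early-exit scan of L.
theorem pv_fold_lookup (ra : List String) (key : String) (L : List Int)
    (hidx : ∀ i ∈ L, (PySem.List.pyGet? ra i).isSome)
    (d : PySem.Dict String (Option String)) :
    ((L.foldl (get_by_key_alt_ins ra (ra.length : Int)) d).get? key).getD none =
      match d.get? key with
      | some v => v
      | none => get_by_key_go ra key L := by
  induction L generalizing d with
  | nil => cases h : d.get? key <;> simp [get_by_key_go, h]
  | cons i rest ih =>
    have hi : (PySem.List.pyGet? ra i).isSome := hidx i (by simp)
    obtain ⟨v, hv⟩ := Option.isSome_iff_exists.mp hi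
    have hrest : ∀ j ∈ rest, (PySem.List.pyGet? ra j).isSome := fun j hj => hidx j (by simp [hj])
    simp only [List.foldl_cons]
    rw [ih hrest]
    simp only [get_by_key_alt_ins, get_by_key_go, hv]
    by_cases hc : d.contains v = true
    · -- already present: dict unchanged; A's scan only matters if key not in d,
      -- in which case v ≠ key (else key would be in d)
      rw [if_pos hc]
      cases hd : d.get? key with
      | some w => rfl
      | none =>
        have hne : v ≠ key := by
          intro he; subst he
          rw [PySem.Dict.contains_eq_isSome_get?, hd] at hc; simp at hc
        rw [if_neg hne]
    · rw [if_neg hc]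
      rw [PySem.Dict.get?_insert]
      by_cases hk : key = v
      · subst hk
        have hd : d.get? key = none := by
          rw [PySem.Dict.contains_eq_isSome_get?] at hc
          cases h : d.get? key <;> simp [h] at hc ⊢
        rw [if_pos rfl, hd]
        simp
      · rw [if_neg hk]
        cases hd : d.get? key with
        | some w => rfl
        | none => rw [if_neg (fun h => hk h.symm)]

-- ===== VERDICT (by name: the statement is the Claim_ definition above) =====
theorem get_by_key_spec : Claim_equal_get_by_key := by
  intro ra key step _ hpre
  unfold Spec_get_by_key get_by_key get_by_key_alt
  have hidx : ∀ i ∈ PySem.List.pyRange 0 (ra.length : Int) step,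
      (PySem.List.pyGet? ra i).isSome := by
    intro i hi
    have hb := pv_mem_range_bounds (ra.length : Int) step i (by positivity) hpre hi
    rw [PySem.List.pyGet?_eq_some_getElem ra hb.1 hb.2]
    simp
  rw [pv_fold_lookup ra key _ hidx PySem.Dict.empty]
  simp [PySem.Dict.get?_empty]
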